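-- pv_equiv track=rewrite | github.com/Protonk/BIDDER | experiments/math/hardy/hardy_echo.py | K_for_block
-- ===== SOURCE A (Python) =====
-- def nth_n_prime(n, K):
--     """Hardy closed form: K-th n-prime for n >= 2.
--     p_K(n) = n · (q · n + r + 1), with (q, r) = divmod(K - 1, n - 1).
--     See core/HARDY-SIDESTEP.md."""
--     if n < 2:
--         raise ValueError(f'Hardy closed form requires n >= 2; got n = {n}')
--     if K < 1:
--         raise ValueError(f'K must be >= 1; got K = {K}')
--     q, r = divmod(K - 1, n - 1)
--     return n * (q * n + r + 1)
--
-- def K_for_block(n, b, d):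
--     """Mode 3: return (K_min, K_max) such that p_K(n) ∈ [b^(d-1), b^d) for
--     K ∈ [K_min, K_max]. Uses the closed-form approximation
--     p_K(n) ≈ K · n² / (n-1) and refines exactly."""
--     lo = b ** (d - 1)
--     hi = b ** d
--     if lo < n:
--         # Block starts below n: K_min is 1 (the first n-prime is n).
--         K_min_guess = 1
--     else:
--         K_min_guess = max(1, lo * (n - 1) // (n * n))
--     K_max_guess = max(K_min_guess, hi * (n - 1) // (n * n) + 1)
--     # Refine K_min: smallest K with p_K(n) >= lo.
--     K = K_min_guess
--     while K > 1 and nth_n_prime(n, K) >= lo: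
--         K -= 1
--     while nth_n_prime(n, K) < lo:
--         K += 1
--     K_min = K
--     # Refine K_max: largest K with p_K(n) < hi.
--     K = K_max_guess
--     while nth_n_prime(n, K) >= hi:
--         K -= 1
--         if K < K_min:
--             return K_min, K_min - 1  # empty
--     while nth_n_prime(n, K + 1) < hi:
--         K += 1
--     K_max = K
--     return K_min, K_max
-- ===== SOURCE B (Python) =====
-- def K_for_block(n, b, d):
--     """Mode 3: return (K_min, K_max) with p_K(n) in [b^(d-1), b^d).
--     Closed form: the n-primes are exactly the multiples of n that are not
--     multiples of n^2, so the number of K >= 1 with p_K(n) < t is counted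
--     directly; no guessing or refinement loops are needed."""
--     lo = b ** (d - 1)
--     hi = b ** d
--
--     def count_below(t):
--         # number of K >= 1 with p_K(n) < t, i.e. of j in [1, (t-1)//n] with n ∤ j
--         m = (t - 1) // n
--         return max(0, m - m // n)
--
--     c_lo = count_below(lo)
--     # clamp K_max to K_min - 1 so an empty block yields the (K_min, K_min - 1) sentinel
--     return c_lo + 1, max(c_lo, count_below(hi))
-- ===== Notes on version B (the rewrite author's own statement) =====
-- stated objective: simpler
-- what changed: A guesses K from an approximation and refines it with four linear correction loops calling nth_n_prime; B computes both endpoints directly by a closed-form count of the n-primes (multiples of n not of n^2) below each block bound, with K_max clamped to K_min - 1 so empty blocks give A's sentinel, removing every loop.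
-- outside the precondition, e.g. on K_for_block(1, 10, 3): A raises ValueError, B returns (1, 0)
import Mathlib
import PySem

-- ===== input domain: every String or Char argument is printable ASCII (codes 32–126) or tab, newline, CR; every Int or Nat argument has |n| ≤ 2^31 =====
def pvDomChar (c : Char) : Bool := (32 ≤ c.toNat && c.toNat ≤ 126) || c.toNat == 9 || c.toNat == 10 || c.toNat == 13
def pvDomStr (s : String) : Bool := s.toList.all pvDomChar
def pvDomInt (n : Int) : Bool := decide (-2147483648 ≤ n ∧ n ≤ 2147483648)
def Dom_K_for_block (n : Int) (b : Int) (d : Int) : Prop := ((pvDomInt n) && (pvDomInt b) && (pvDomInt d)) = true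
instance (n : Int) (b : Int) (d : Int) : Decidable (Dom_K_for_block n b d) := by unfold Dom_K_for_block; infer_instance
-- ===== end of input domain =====

-- B replaces A's guess-plus-linear-refinement by a direct closed-form count of the
-- n-primes below each block bound (objective: simpler).

-- ===== PORT A =====
-- Python's nth_n_prime raises for n < 2 or K < 1; on Pre_, K_for_block only calls it
-- with n ≥ 2 and K ≥ 1, where this formula is exactly Python's value.
def nthNPrime (n K : Int) : Int :=
  let q := PySem.Int.floordiv (K - 1) (n - 1)
  let r := PySem.Int.mod (K - 1) (n - 1)
  n * (q * n + r + 1)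

-- while K > 1 and nth_n_prime(n, K) >= lo: K -= 1    (fuel only makes the loop total;
-- on Pre_ inputs the supplied fuel is never exhausted — proved in the lemmas below)
def refineMinDown (n lo : Int) : Nat → Int → Int
  | 0, K => K
  | fuel+1, K => if 1 < K ∧ lo ≤ nthNPrime n K then refineMinDown n lo fuel (K - 1) else K

-- while nth_n_prime(n, K) < lo: K += 1
def refineMinUp (n lo : Int) : Nat → Int → Int
  | 0, K => K
  | fuel+1, K => if nthNPrime n K < lo then refineMinUp n lo fuel (K + 1) else K

-- while nth_n_prime(n, K) >= hi: K -= 1; if K < K_min: return empty (none = early return)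
def refineMaxDown (n hi Kmin : Int) : Nat → Int → Option Int
  | 0, K => some K
  | fuel+1, K =>
      if hi ≤ nthNPrime n K then
        if K - 1 < Kmin then none else refineMaxDown n hi Kmin fuel (K - 1)
      else some K

-- while nth_n_prime(n, K + 1) < hi: K += 1
def refineMaxUp (n hi : Int) : Nat → Int → Int
  | 0, K => K
  | fuel+1, K => if nthNPrime n (K + 1) < hi then refineMaxUp n hi fuel (K + 1) else K

def K_for_block (n : Int) (b : Int) (d : Int) : Int × Int :=
  -- b ** (d - 1) / b ** d: exact for d ≥ 1; for d ≤ 0 (inside Pre_ only when b ≠ 0)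
  -- Python computes float bounds in (-1, 1] and falls through to (1, 0), which the
  -- clamped-exponent bounds lo = hi = b^0 = 1 reproduce on the same control path.
  let lo := b ^ (d - 1).toNat
  let hi := b ^ d.toNat
  let KminGuess := if lo < n then 1 else max 1 (PySem.Int.floordiv (lo * (n - 1)) (n * n))
  let KmaxGuess := max KminGuess (PySem.Int.floordiv (hi * (n - 1)) (n * n) + 1)
  let K1 := refineMinDown n lo (KminGuess.toNat + 1) KminGuess
  let Kmin := refineMinUp n lo ((lo - K1).toNat + 1) K1
  match refineMaxDown n hi Kmin (KmaxGuess.toNat + 1) KmaxGuess with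
  | none => (Kmin, Kmin - 1)
  | some K => (Kmin, refineMaxUp n hi ((hi - K).toNat + 1) K)

-- ===== PORT B =====
-- number of K >= 1 with p_K(n) < t, i.e. of j in [1, (t-1)//n] with n ∤ j
def countBelow (n t : Int) : Int :=
  -- m = (t - 1) // n, count = max(0, m - m // n)
  max 0 (PySem.Int.floordiv (t - 1) n - PySem.Int.floordiv (PySem.Int.floordiv (t - 1) n) n)

def K_for_block_alt (n : Int) (b : Int) (d : Int) : Int × Int :=
  let lo := b ^ (d - 1).toNat   -- as in port A: exact for d ≥ 1, clamped for d ≤ 0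
  let hi := b ^ d.toNat
  let cLo := countBelow n lo
  -- clamp K_max to K_min - 1 so an empty block yields the (K_min, K_min - 1) sentinel
  (cLo + 1, max cLo (countBelow n hi))

-- ===== PRECONDITION & SPEC =====
-- Pre_ excludes n < 2 (nth_n_prime raises ValueError) and b = 0 with d ≤ 0
-- (0 ** negative raises ZeroDivisionError); A returns on everything else.
def Pre_K_for_block (n : Int) (b : Int) (d : Int) : Prop := 2 ≤ n ∧ (b = 0 → 1 ≤ d)
instance (n : Int) (b : Int) (d : Int) : Decidable (Pre_K_for_block n b d) := by unfold Pre_K_for_block; infer_instance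

def pvWitness_K_for_block : Int × Int × Int := (2, 10, 3)

def Spec_K_for_block (n : Int) (b : Int) (d : Int) (out : Int × Int) : Prop := out = K_for_block_alt n b d
instance (n : Int) (b : Int) (d : Int) (out : Int × Int) : Decidable (Spec_K_for_block n b d out) := by unfold Spec_K_for_block; infer_instance

-- ===== CLAIM (what is proved, stated in full; the proofs are below) =====
def Claim_equal_K_for_block : Prop := ∀ (n : Int) (b : Int) (d : Int), Dom_K_for_block n b d → Pre_K_for_block n b d → Spec_K_for_block n b d (K_for_block n b d)

-- ===== LEMMAS AND PROOFS =====

-- p_K(n) = n * (K + (K-1)//(n-1)) — true for every n, K by the divmod identity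
theorem nthNPrime_eq (n K : Int) :
    nthNPrime n K = n * (K + PySem.Int.floordiv (K - 1) (n - 1)) := by
  have h := PySem.Int.floordiv_mul_add_mod (K - 1) (n - 1)
  unfold nthNPrime
  set q := PySem.Int.floordiv (K - 1) (n - 1) with hq
  set r := PySem.Int.mod (K - 1) (n - 1) with hr
  have : r = K - 1 - q * (n - 1) := by linarith
  rw [this]; ring

-- fOf n K := K + (K-1)//(n-1) (as ediv), so that nthNPrime n K = n * fOf n K for n ≥ 2
def fOf (n K : Int) : Int := K + (K - 1) / (n - 1)

theorem nthNPrime_eq_f {n : Int} (hn : 2 ≤ n) (K : Int) : nthNPrime n K = n * fOf n K := by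
  rw [nthNPrime_eq, PySem.Int.floordiv_eq_ediv_of_pos (by omega)]; rfl

theorem fOf_mono {n : Int} (hn : 2 ≤ n) {K K' : Int} (h : K ≤ K') : fOf n K ≤ fOf n K' := by
  unfold fOf
  have := Int.ediv_le_ediv (c := n - 1) (by omega) (show K - 1 ≤ K' - 1 by omega)
  omega

theorem nthNPrime_lower {n K : Int} (hn : 2 ≤ n) (hK : 1 ≤ K) : K ≤ nthNPrime n K := by
  rw [nthNPrime_eq_f hn]
  have hq : 0 ≤ (K - 1) / (n - 1) := Int.ediv_nonneg (by omega) (by omega)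
  have hf : K ≤ fOf n K := by unfold fOf; omega
  nlinarith

-- the Galois companion of fOf: with g = M - M/n, fOf n g ≤ M < fOf n (g+1)
theorem fOf_galois {n : Int} (hn : 2 ≤ n) (M : Int) :
    fOf n (M - M / n) ≤ M ∧ M < fOf n (M - M / n + 1) := by
  set a := M / n with ha
  set s := M % n with hs
  have hM : n * a + s = M := Int.mul_ediv_add_emod M n
  have hs0 : 0 ≤ s := Int.emod_nonneg M (by omega)
  have hsn : s < n := Int.emod_lt_of_pos M (by omega)
  have hg1 : M - a - 1 = s - 1 + a * (n - 1) := by rw [← hM]; ring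
  have hg2 : M - a + 1 - 1 = s + a * (n - 1) := by rw [← hM]; ring
  constructor
  · unfold fOf
    rw [hg1, Int.add_mul_ediv_right _ _ (show n - 1 ≠ 0 by omega)]
    rcases eq_or_lt_of_le hs0 with h0 | h1
    · have : (s - 1) / (n - 1) = -1 := by
        rw [← h0]
        have : ((-1 : Int)) / (n - 1) = -1 := by
          have h := Int.add_mul_ediv_right (n - 2) (-1) (show n - 1 ≠ 0 by omega)
          have he : n - 2 + -1 * (n - 1) = -1 := by ring
          rw [he] at h
          have : (n - 2) / (n - 1) = 0 := Int.ediv_eq_zero_of_lt (by omega) (by omega)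
          omega
        simpa using this
      omega
    · have : (s - 1) / (n - 1) = 0 := Int.ediv_eq_zero_of_lt (by omega) (by omega)
      omega
  · unfold fOf
    rw [hg2, Int.add_mul_ediv_right _ _ (show n - 1 ≠ 0 by omega)]
    have : 0 ≤ s / (n - 1) := Int.ediv_nonneg hs0 (by omega)
    omega

-- the characterisation both ports hinge on: for K ≥ 1, p_K(n) < t ⟺ K ≤ countBelow n t
theorem countBelow_char {n : Int} (hn : 2 ≤ n) {K : Int} (hK : 1 ≤ K) (t : Int) :
    (nthNPrime n K < t ↔ K ≤ countBelow n t) := by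
  unfold countBelow
  rw [PySem.Int.floordiv_eq_ediv_of_pos (show (0:Int) < n by omega)]
  rw [PySem.Int.floordiv_eq_ediv_of_pos (show (0:Int) < n by omega)]
  set M := (t - 1) / n with hM
  have key : nthNPrime n K < t ↔ K ≤ M - M / n := by
    have h1 : nthNPrime n K < t ↔ fOf n K ≤ M := by
      rw [nthNPrime_eq_f hn]
      constructor
      · intro h
        have : fOf n K * n ≤ t - 1 := by nlinarith
        have := (PySem.Int.le_floordiv_iff_mul_le (a := t - 1) (b := n) (q := fOf n K) (by omega)).mpr this
        rwa [PySem.Int.floordiv_eq_ediv_of_pos (by omega)] at this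
      · intro h
        have := (PySem.Int.le_floordiv_iff_mul_le (a := t - 1) (b := n) (q := fOf n K) (by omega)).mp
          (by rwa [PySem.Int.floordiv_eq_ediv_of_pos (by omega)])
        nlinarith
    rw [h1]
    obtain ⟨hgl, hgr⟩ := fOf_galois hn M
    constructor
    · intro h
      by_contra hc
      have := fOf_mono hn (show M - M / n + 1 ≤ K by omega)
      omega
    · intro h
      have := fOf_mono hn h
      omega
  rw [key]
  simp only [max_def]
  split <;> omega

theorem countBelow_nonneg (n t : Int) : 0 ≤ countBelow n t := le_max_left _ _

theorem countBelow_lt {n t : Int} (hn : 2 ≤ n) (h : 1 ≤ countBelow n t) : countBelow n t < t := by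
  have h1 := (countBelow_char hn h t).mpr le_rfl
  have h2 := nthNPrime_lower hn h
  omega

theorem countBelow_mono {n lo hi : Int} (hn : 2 ≤ n) (h : lo ≤ hi) :
    countBelow n lo ≤ countBelow n hi := by
  by_cases h1 : 1 ≤ countBelow n lo
  · have hp := (countBelow_char hn h1 lo).mpr le_rfl
    exact (countBelow_char hn h1 hi).mp (by omega)
  · have := countBelow_nonneg n hi; omega

-- the four refinement loops, characterised (T := countBelow n lo + 1 is the least K ≥ 1
-- with p_K ≥ lo; c' := countBelow n hi the largest K with p_K < hi, 0 if none)
theorem refineMinDown_eq {n lo : Int} (hn : 2 ≤ n) :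
    ∀ (fuel : Nat) (K : Int), 1 ≤ K → K.toNat ≤ fuel →
      refineMinDown n lo fuel K = max 1 (min K (countBelow n lo)) := by
  intro fuel
  induction fuel with
  | zero => intro K hK hf; omega
  | succ m ih =>
    intro K hK hf
    rw [refineMinDown]
    by_cases hg : 1 < K ∧ lo ≤ nthNPrime n K
    · have hKc : countBelow n lo + 1 ≤ K := by
        by_contra h
        exact absurd ((countBelow_char hn hK lo).mpr (by omega)) (by omega)
      rw [if_pos hg, ih (K - 1) (by omega) (by omega)]
      omega
    · rw [if_neg hg]
      by_cases h1 : 1 < K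
      · have hlt : nthNPrime n K < lo := by
          by_contra hc
          exact hg ⟨h1, by omega⟩
        have hKc : K ≤ countBelow n lo := (countBelow_char hn hK lo).mp (by omega)
        omega
      · omega

theorem refineMinUp_eq {n lo : Int} (hn : 2 ≤ n) :
    ∀ (fuel : Nat) (K : Int), 1 ≤ K → countBelow n lo + 1 - K < (fuel : Int) →
      refineMinUp n lo fuel K = max K (countBelow n lo + 1) := by
  intro fuel
  induction fuel with
  | zero => intro K hK hf; rw [refineMinUp]; omega
  | succ m ih =>
    intro K hK hf
    rw [refineMinUp]
    by_cases hg : nthNPrime n K < lo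
    · have hKc : K ≤ countBelow n lo := (countBelow_char hn hK lo).mp hg
      rw [if_pos hg, ih (K + 1) (by omega) (by omega)]
      omega
    · rw [if_neg hg]
      have : countBelow n lo + 1 ≤ K := by
        by_contra hc
        exact hg ((countBelow_char hn hK lo).mpr (by omega))
      omega

theorem refineMaxDown_eq {n hi T : Int} (hn : 2 ≤ n) (hT : 1 ≤ T) :
    ∀ (fuel : Nat) (K : Int), 1 ≤ K → K.toNat ≤ fuel →
      refineMaxDown n hi T fuel K =
        (if K < countBelow n hi + 1 then some K
         else if T ≤ countBelow n hi then some (countBelow n hi) else none) := by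
  intro fuel
  induction fuel with
  | zero => intro K hK hf; omega
  | succ m ih =>
    intro K hK hf
    rw [refineMaxDown]
    by_cases hg : hi ≤ nthNPrime n K
    · have hKc : countBelow n hi + 1 ≤ K := by
        by_contra h
        exact absurd ((countBelow_char hn hK hi).mpr (by omega)) (by omega)
      rw [if_pos hg]
      by_cases hret : K - 1 < T
      · rw [if_pos hret, if_neg (by omega), if_neg (by omega)]
      · rw [if_neg hret, ih (K - 1) (by omega) (by omega)]
        have hc0 := countBelow_nonneg n hi
        rw [if_neg (show ¬ K < countBelow n hi + 1 by omega)]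
        by_cases h2 : K - 1 < countBelow n hi + 1
        · rw [if_pos h2, if_pos (show T ≤ countBelow n hi by omega)]
          congr 1; omega
        · rw [if_neg h2]
    · rw [if_neg hg]
      have : K ≤ countBelow n hi := (countBelow_char hn hK hi).mp (by omega)
      rw [if_pos (by omega)]

theorem refineMaxUp_eq {n hi : Int} (hn : 2 ≤ n) :
    ∀ (fuel : Nat) (K : Int), 0 ≤ K → countBelow n hi - K < (fuel : Int) →
      refineMaxUp n hi fuel K = max K (countBelow n hi) := by
  intro fuel
  induction fuel with
  | zero => intro K hK hf; rw [refineMaxUp]; omega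
  | succ m ih =>
    intro K hK hf
    rw [refineMaxUp]
    by_cases hg : nthNPrime n (K + 1) < hi
    · have hKc : K + 1 ≤ countBelow n hi := (countBelow_char hn (by omega) hi).mp hg
      rw [if_pos hg, ih (K + 1) (by omega) (by omega)]
      omega
    · rw [if_neg hg]
      have : countBelow n hi ≤ K := by
        by_contra hc
        exact hg ((countBelow_char hn (by omega) hi).mpr (by omega))
      omega

-- lo = b^(d-1), hi = b^d (with the port's exponent clamp): hi ≤ 0 or lo ≤ hi
theorem pow_block_bounds (b d : Int) :
    b ^ d.toNat ≤ 0 ∨ b ^ (d - 1).toNat ≤ b ^ d.toNat := by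
  by_cases hd : d ≤ 0
  · right
    have : d.toNat = (d - 1).toNat := by omega
    rw [this]
  · have hd : 0 < d := by omega
    have hsucc : d.toNat = (d - 1).toNat + 1 := by omega
    rw [hsucc, pow_succ]
    set L := b ^ (d - 1).toNat with hL
    by_cases hb : 1 ≤ b
    · right
      have hL1 : (0:Int) < L := pow_pos (by omega) _
      nlinarith
    · by_cases hL0 : L ≤ 0
      · right; nlinarith
      · left; nlinarith

theorem K_for_block_eq (n b d : Int) (hn : 2 ≤ n) :
    K_for_block n b d = K_for_block_alt n b d := by
  simp only [K_for_block, K_for_block_alt]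
  set lo := b ^ (d - 1).toNat with hlo
  set hi := b ^ d.toNat with hhi
  set cLo := countBelow n lo with hcLo
  set cHi := countBelow n hi with hcHi
  have hcLo0 : 0 ≤ cLo := countBelow_nonneg n lo
  have hcHi0 : 0 ≤ cHi := countBelow_nonneg n hi
  set Kg := (if lo < n then 1 else max 1 (PySem.Int.floordiv (lo * (n - 1)) (n * n))) with hKg
  set Kg2 := max Kg (PySem.Int.floordiv (hi * (n - 1)) (n * n) + 1) with hKg2
  have hKg1 : 1 ≤ Kg := by
    rw [hKg]; split
    · omega
    · exact le_max_left _ _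
  have hKg21 : 1 ≤ Kg2 := le_trans hKg1 (le_max_left _ _)
  rw [refineMinDown_eq hn _ _ hKg1 (by omega)]
  set K1 := max 1 (min Kg cLo) with hK1
  have hK11 : 1 ≤ K1 := le_max_left _ _
  have hK1T : K1 ≤ cLo + 1 := by omega
  have hfuel1 : cLo + 1 - K1 < ((lo - K1).toNat + 1 : Nat) := by
    by_cases hc : 1 ≤ cLo
    · have := countBelow_lt hn (hcLo ▸ hc)
      push_cast; omega
    · push_cast; omega
  rw [refineMinUp_eq hn _ _ hK11 hfuel1]
  have hKmin : max K1 (cLo + 1) = cLo + 1 := by omega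
  rw [hKmin]
  rw [refineMaxDown_eq hn (by omega) _ _ hKg21 (by omega)]
  by_cases h1 : Kg2 < cHi + 1
  · rw [if_pos h1]
    -- Kg2 ≤ cHi, so cHi ≥ 1, hence hi > p_cHi ≥ 1, hence lo ≤ hi and cLo ≤ cHi
    have hcHi1 : 1 ≤ cHi := by omega
    have hhi2 : cHi < hi := countBelow_lt hn (hcHi ▸ hcHi1)
    have hlohi : lo ≤ hi := by
      rcases pow_block_bounds b d with h | h
      · omega
      · exact h
    have hmono : cLo ≤ cHi := countBelow_mono hn hlohi
    have hfuel2 : cHi - Kg2 < ((hi - Kg2).toNat + 1 : Nat) := by push_cast; omega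
    show (cLo + 1, refineMaxUp n hi ((hi - Kg2).toNat + 1) Kg2) = (cLo + 1, max cLo cHi)
    rw [refineMaxUp_eq hn _ _ (by omega) hfuel2]
    have : max Kg2 cHi = max cLo cHi := by omega
    rw [this]
  · rw [if_neg h1]
    by_cases h2 : cLo + 1 ≤ cHi
    · rw [if_pos h2]
      have hcHi1 : 1 ≤ cHi := by omega
      have hhi2 : cHi < hi := countBelow_lt hn (hcHi ▸ hcHi1)
      have hfuel3 : cHi - cHi < ((hi - cHi).toNat + 1 : Nat) := by push_cast; omega
      show (cLo + 1, refineMaxUp n hi ((hi - cHi).toNat + 1) cHi) = (cLo + 1, max cLo cHi)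
      rw [refineMaxUp_eq hn _ _ (by omega) hfuel3]
      have : max cHi cHi = max cLo cHi := by omega
      rw [this]
    · rw [if_neg h2]
      show (cLo + 1, cLo + 1 - 1) = (cLo + 1, max cLo cHi)
      have : cLo + 1 - 1 = max cLo cHi := by omega
      rw [this]

-- ===== VERDICT (by name: the statement is the Claim_ definition above) =====
theorem K_for_block_spec : Claim_equal_K_for_block := by
  intro n b d _ hpre
  unfold Spec_K_for_block
  exact K_for_block_eq n b d hpre.1
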